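-- pv_equiv track=rewrite | github.com/Lucstanislash/Projet-Python | interface_ordonnancement.py | CalculMoy
-- ===== SOURCE A (Python) =====
-- def CalculMoy(lp):
--     nb_proc= 10
--     t_sejour = 0
--     somme_sej=0
--     for element in lp:
--         t_sejour += element['d']
--         #date_fin = t_sejour+element['date_arriv']
--         somme_sej=somme_sej+ t_sejour
--         #moysej=float(somme_sej)/nb_proc
--     p1= somme_sej
--     p2= nb_proc
--
--     return (p1,p2)
-- ===== SOURCE B (Python) =====
-- def CalculMoy(lp):
--     n = len(lp)
--     somme = 0
--     for i, element in enumerate(lp):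
--         somme += element['d'] * (n - i)
--     return (somme, 10)
-- ===== Notes on version B (the rewrite author's own statement) =====
-- stated objective: alternative
-- what changed: Replaces A's chained running-prefix accumulator (two accumulators: running stay time and its running sum) by a single position-weighted pass: each element's 'd' is multiplied by the number of elements from it to the end (n - i), using sum-of-prefix-sums = sum of d_i*(n-i).
import Mathlib
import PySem

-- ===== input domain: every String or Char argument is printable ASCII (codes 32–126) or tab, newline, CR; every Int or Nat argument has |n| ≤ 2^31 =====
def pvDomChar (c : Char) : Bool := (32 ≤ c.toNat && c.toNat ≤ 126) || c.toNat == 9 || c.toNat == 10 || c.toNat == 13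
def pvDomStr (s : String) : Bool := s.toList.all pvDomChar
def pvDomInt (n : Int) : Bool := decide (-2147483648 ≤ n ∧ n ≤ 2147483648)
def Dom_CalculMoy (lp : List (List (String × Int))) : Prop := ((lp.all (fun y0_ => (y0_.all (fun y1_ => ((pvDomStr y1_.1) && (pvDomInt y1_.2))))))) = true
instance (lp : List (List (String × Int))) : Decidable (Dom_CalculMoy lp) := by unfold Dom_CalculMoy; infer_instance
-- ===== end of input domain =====

-- B replaces A's two chained running accumulators by one position-weighted pass (sum of prefix sums = Σ d_i·(n−i)); equal cost, different decomposition.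

-- ===== PORT A =====
-- element['d'] : Pre_ guarantees the key is present, so getD 0 is never the default
def pvD (element : List (String × Int)) : Int :=
  ((PySem.Dict.ofList element).get? "d").getD 0

-- A: t_sejour and somme_sej updated together in one loop over lp
def CalculMoy (lp : List (List (String × Int))) : Int × Int :=
  let st := lp.foldl (fun (acc : Int × Int) element =>
      let t_sejour := acc.1 + pvD element
      (t_sejour, acc.2 + t_sejour)) (0, 0)
  (st.2, 10)

-- ===== PORT B =====
-- B: single enumerate pass, somme += element['d'] * (n - i)
def CalculMoy_alt (lp : List (List (String × Int))) : Int × Int :=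
  let n : Int := lp.length
  let somme := (PySem.List.enumerate lp).foldl
      (fun (somme : Int) ie => somme + pvD ie.2 * (n - ie.1)) 0
  (somme, 10)

-- ===== PRECONDITION & SPEC =====
-- A raises KeyError when some element lacks the key 'd'; Pre_ requires it in every element.
def Pre_CalculMoy (lp : List (List (String × Int))) : Prop :=
  (lp.all (fun e => e.any (fun p => p.1 == "d"))) = true
instance (lp : List (List (String × Int))) : Decidable (Pre_CalculMoy lp) := by unfold Pre_CalculMoy; infer_instance

def pvWitness_CalculMoy : (List (List (String × Int))) := [[("d", 3)], [("d", 5), ("date_arriv", 1)]]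

def Spec_CalculMoy (lp : List (List (String × Int))) (out : Int × Int) : Prop := out = CalculMoy_alt lp
instance (lp : List (List (String × Int))) (out : Int × Int) : Decidable (Spec_CalculMoy lp out) := by unfold Spec_CalculMoy; infer_instance

-- ===== CLAIM (what is proved, stated in full; the proofs are below) =====
def Claim_equal_CalculMoy : Prop := ∀ (lp : List (List (String × Int))), Dom_CalculMoy lp → Pre_CalculMoy lp → Spec_CalculMoy lp (CalculMoy lp)

-- ===== LEMMAS AND PROOFS =====

-- position-weighted sum: head counts lp.length times, each tail element its own tail-relative weight
def pvW : List (List (String × Int)) → Int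
  | [] => 0
  | e :: rest => pvD e * ((rest.length : Int) + 1) + pvW rest

lemma foldA_eq (lp : List (List (String × Int))) : ∀ t s : Int,
    (lp.foldl (fun (acc : Int × Int) element =>
      let t_sejour := acc.1 + pvD element
      (t_sejour, acc.2 + t_sejour)) (t, s)).2 = s + t * lp.length + pvW lp := by
  induction lp with
  | nil => intro t s; simp [pvW]
  | cons e rest ih =>
    intro t s
    simp only [List.foldl_cons, ih, pvW, List.length_cons]
    push_cast
    ring

-- plain sum of the 'd' values
def pvS : List (List (String × Int)) → Int
  | [] => 0
  | e :: rest => pvD e + pvS rest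

lemma foldB_eq (lp : List (List (String × Int))) : ∀ (k : Int) (acc n : Int),
    ((PySem.List.enumerate lp k).foldl
      (fun (somme : Int) ie => somme + pvD ie.2 * (n - ie.1)) acc)
    = acc + pvW lp + (n - k - lp.length) * pvS lp := by
  induction lp with
  | nil => intro k acc n; simp [PySem.List.enumerate_nil, pvW, pvS]
  | cons e rest ih =>
    intro k acc n
    rw [PySem.List.enumerate_cons]
    simp only [List.foldl_cons, ih, pvW, pvS, List.length_cons]
    push_cast
    ring

-- ===== VERDICT (by name: the statement is the Claim_ definition above) =====
theorem CalculMoy_spec : Claim_equal_CalculMoy := by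
  intro lp _ _
  unfold Spec_CalculMoy CalculMoy CalculMoy_alt
  simp only [foldA_eq, foldB_eq, Prod.mk.injEq, and_true]
  ring
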